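-- pv_equiv track=rewrite | github.com/kotharipeddirajulu/Cipherware | encode.py | Porta_key_generator
-- ===== SOURCE A (Python) =====
-- def Porta_key_generator(key):
--     alphabet = {
--         "A": [["A", "B", "C", "D", "E", "F", "G", "H", "I", "J", "K", "L", "M"],
--               ["N", "O", "P", "Q", "R", "S", "T", "U", "V", "W", "X", "Y", "Z"]],
--         "B": [["A", "B", "C", "D", "E", "F", "G", "H", "I", "J", "K", "L", "M"],
--               ["N", "O", "P", "Q", "R", "S", "T", "U", "V", "W", "X", "Y", "Z"]],
--         "C": [["A", "B", "C", "D", "E", "F", "G", "H", "I", "J", "K", "L", "M"],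
--               ["Z", "N", "O", "P", "Q", "R", "S", "T", "U", "V", "W", "X", "Y"]],
--         "D": [["A", "B", "C", "D", "E", "F", "G", "H", "I", "J", "K", "L", "M"],
--               ["Z", "N", "O", "P", "Q", "R", "S", "T", "U", "V", "W", "X", "Y"]],
--         "E": [["A", "B", "C", "D", "E", "F", "G", "H", "I", "J", "K", "L", "M"],
--               ["Y", "Z", "N", "O", "P", "Q", "R", "S", "T", "U", "V", "W", "X"]],
--         "F": [["A", "B", "C", "D", "E", "F", "G", "H", "I", "J", "K", "L", "M"],
--               ["Y", "Z", "N", "O", "P", "Q", "R", "S", "T", "U", "V", "W", "X"]],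
--         "G": [["A", "B", "C", "D", "E", "F", "G", "H", "I", "J", "K", "L", "M"],
--               ["X", "Y", "Z", "N", "O", "P", "Q", "R", "S", "T", "U", "V", "W"]],
--         "H": [["A", "B", "C", "D", "E", "F", "G", "H", "I", "J", "K", "L", "M"],
--               ["X", "Y", "Z", "N", "O", "P", "Q", "R", "S", "T", "U", "V", "W"]],
--         "I": [["A", "B", "C", "D", "E", "F", "G", "H", "I", "J", "K", "L", "M"],
--               ["W", "X", "Y", "Z", "N", "O", "P", "Q", "R", "S", "T", "U", "V"]],
--         "J": [["A", "B", "C", "D", "E", "F", "G", "H", "I", "J", "K", "L", "M"],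
--               ["W", "X", "Y", "Z", "N", "O", "P", "Q", "R", "S", "T", "U", "V"]],
--         "K": [["A", "B", "C", "D", "E", "F", "G", "H", "I", "J", "K", "L", "M"],
--               ["V", "W", "X", "Y", "Z", "N", "O", "P", "Q", "R", "S", "T", "U"]],
--         "L": [["A", "B", "C", "D", "E", "F", "G", "H", "I", "J", "K", "L", "M"],
--               ["V", "W", "X", "Y", "Z", "N", "O", "P", "Q", "R", "S", "T", "U"]],
--         "M": [["A", "B", "C", "D", "E", "F", "G", "H", "I", "J", "K", "L", "M"],
--               ["U", "V", "W", "X", "Y", "Z", "N", "O", "P", "Q", "R", "S", "T"]],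
--         "N": [["A", "B", "C", "D", "E", "F", "G", "H", "I", "J", "K", "L", "M"],
--               ["U", "V", "W", "X", "Y", "Z", "N", "O", "P", "Q", "R", "S", "T"]],
--         "O": [["A", "B", "C", "D", "E", "F", "G", "H", "I", "J", "K", "L", "M"],
--               ["T", "U", "V", "W", "X", "Y", "Z", "N", "O", "P", "Q", "R", "S"]],
--         "P": [["A", "B", "C", "D", "E", "F", "G", "H", "I", "J", "K", "L", "M"],
--               ["T", "U", "V", "W", "X", "Y", "Z", "N", "O", "P", "Q", "R", "S"]],
--         "Q": [["A", "B", "C", "D", "E", "F", "G", "H", "I", "J", "K", "L", "M"],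
--               ["S", "T", "U", "V", "W", "X", "Y", "Z", "N", "O", "P", "Q", "R"]],
--         "R": [["A", "B", "C", "D", "E", "F", "G", "H", "I", "J", "K", "L", "M"],
--               ["S", "T", "U", "V", "W", "X", "Y", "Z", "N", "O", "P", "Q", "R"]],
--         "S": [["A", "B", "C", "D", "E", "F", "G", "H", "I", "J", "K", "L", "M"],
--               ["R", "S", "T", "U", "V", "W", "X", "Y", "Z", "N", "O", "P", "Q"]],
--         "T": [["A", "B", "C", "D", "E", "F", "G", "H", "I", "J", "K", "L", "M"],
--               ["R", "S", "T", "U", "V", "W", "X", "Y", "Z", "N", "O", "P", "Q"]],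
--         "U": [["A", "B", "C", "D", "E", "F", "G", "H", "I", "J", "K", "L", "M"],
--               ["Q", "R", "S", "T", "U", "V", "W", "X", "Y", "Z", "N", "O", "P"]],
--         "V": [["A", "B", "C", "D", "E", "F", "G", "H", "I", "J", "K", "L", "M"],
--               ["Q", "R", "S", "T", "U", "V", "W", "X", "Y", "Z", "N", "O", "P"]],
--         "W": [["A", "B", "C", "D", "E", "F", "G", "H", "I", "J", "K", "L", "M"],
--               ["P", "Q", "R", "S", "T", "U", "V", "W", "X", "Y", "Z", "N", "O"]],
--         "X": [["A", "B", "C", "D", "E", "F", "G", "H", "I", "J", "K", "L", "M"],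
--               ["P", "Q", "R", "S", "T", "U", "V", "W", "X", "Y", "Z", "N", "O"]],
--         "Y": [["A", "B", "C", "D", "E", "F", "G", "H", "I", "J", "K", "L", "M"],
--               ["O", "P", "Q", "R", "S", "T", "U", "V", "W", "X", "Y", "Z", "N"]],
--         "Z": [["A", "B", "C", "D", "E", "F", "G", "H", "I", "J", "K", "L", "M"],
--               ["O", "P", "Q", "R", "S", "T", "U", "V", "W", "X", "Y", "Z", "N"]]}
--
--     tab = []
--     for alpha in key.upper():
--         tab.append(alphabet[alpha])
--     return tab
-- ===== SOURCE B (Python) =====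
-- def _porta_row(ch):
--     i = ord(ch) - 65
--     if not 0 <= i < 26:
--         raise KeyError(ch)
--     s = 13 - i // 2
--     base = list("NOPQRSTUVWXYZ")
--     return [list("ABCDEFGHIJKLM"), base[s:] + base[:s]]
--
--
-- def Porta_key_generator(key):
--     return [_porta_row(ch) for ch in key.upper()]
-- ===== Notes on version B (the rewrite author's own statement) =====
-- stated objective: simpler
-- what changed: Replaces the 26-entry literal lookup table by arithmetic: each Porta row pair is computed from the character code by rotating the fixed second half-alphabet by 13 - (ord(c)-65)//2, via a helper used in a comprehension.
import Mathlib
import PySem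

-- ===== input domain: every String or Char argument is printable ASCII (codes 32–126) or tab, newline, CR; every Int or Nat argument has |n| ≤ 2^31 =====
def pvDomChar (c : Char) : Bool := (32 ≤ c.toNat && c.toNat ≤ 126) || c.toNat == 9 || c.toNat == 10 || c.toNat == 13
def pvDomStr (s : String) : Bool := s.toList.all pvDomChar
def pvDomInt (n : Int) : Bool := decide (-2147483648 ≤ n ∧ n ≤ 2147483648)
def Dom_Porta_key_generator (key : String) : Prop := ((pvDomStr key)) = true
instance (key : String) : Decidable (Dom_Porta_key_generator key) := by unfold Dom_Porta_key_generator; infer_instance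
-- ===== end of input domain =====

-- B replaces A's 26-entry literal lookup table by computing each row pair arithmetically
-- (rotate the fixed second half-alphabet by 13 - (ord(c)-65)//2); objective: simpler.

-- ===== PORT A =====
-- A's first row, repeated verbatim in every dict entry.
def pvRowAM : List String := ["A","B","C","D","E","F","G","H","I","J","K","L","M"]

-- A's dict literal (keys are the length-1 strings, ported as Char per the type convention).
def pvAlphabet : PySem.Dict Char (List (List String)) := PySem.Dict.ofList
  [ ('A', [pvRowAM, ["N","O","P","Q","R","S","T","U","V","W","X","Y","Z"]]),
    ('B', [pvRowAM, ["N","O","P","Q","R","S","T","U","V","W","X","Y","Z"]]),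
    ('C', [pvRowAM, ["Z","N","O","P","Q","R","S","T","U","V","W","X","Y"]]),
    ('D', [pvRowAM, ["Z","N","O","P","Q","R","S","T","U","V","W","X","Y"]]),
    ('E', [pvRowAM, ["Y","Z","N","O","P","Q","R","S","T","U","V","W","X"]]),
    ('F', [pvRowAM, ["Y","Z","N","O","P","Q","R","S","T","U","V","W","X"]]),
    ('G', [pvRowAM, ["X","Y","Z","N","O","P","Q","R","S","T","U","V","W"]]),
    ('H', [pvRowAM, ["X","Y","Z","N","O","P","Q","R","S","T","U","V","W"]]),
    ('I', [pvRowAM, ["W","X","Y","Z","N","O","P","Q","R","S","T","U","V"]]),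
    ('J', [pvRowAM, ["W","X","Y","Z","N","O","P","Q","R","S","T","U","V"]]),
    ('K', [pvRowAM, ["V","W","X","Y","Z","N","O","P","Q","R","S","T","U"]]),
    ('L', [pvRowAM, ["V","W","X","Y","Z","N","O","P","Q","R","S","T","U"]]),
    ('M', [pvRowAM, ["U","V","W","X","Y","Z","N","O","P","Q","R","S","T"]]),
    ('N', [pvRowAM, ["U","V","W","X","Y","Z","N","O","P","Q","R","S","T"]]),
    ('O', [pvRowAM, ["T","U","V","W","X","Y","Z","N","O","P","Q","R","S"]]),
    ('P', [pvRowAM, ["T","U","V","W","X","Y","Z","N","O","P","Q","R","S"]]),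
    ('Q', [pvRowAM, ["S","T","U","V","W","X","Y","Z","N","O","P","Q","R"]]),
    ('R', [pvRowAM, ["S","T","U","V","W","X","Y","Z","N","O","P","Q","R"]]),
    ('S', [pvRowAM, ["R","S","T","U","V","W","X","Y","Z","N","O","P","Q"]]),
    ('T', [pvRowAM, ["R","S","T","U","V","W","X","Y","Z","N","O","P","Q"]]),
    ('U', [pvRowAM, ["Q","R","S","T","U","V","W","X","Y","Z","N","O","P"]]),
    ('V', [pvRowAM, ["Q","R","S","T","U","V","W","X","Y","Z","N","O","P"]]),
    ('W', [pvRowAM, ["P","Q","R","S","T","U","V","W","X","Y","Z","N","O"]]),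
    ('X', [pvRowAM, ["P","Q","R","S","T","U","V","W","X","Y","Z","N","O"]]),
    ('Y', [pvRowAM, ["O","P","Q","R","S","T","U","V","W","X","Y","Z","N"]]),
    ('Z', [pvRowAM, ["O","P","Q","R","S","T","U","V","W","X","Y","Z","N"]]) ]

-- A's loop: tab = []; for alpha in key.upper(): tab.append(alphabet[alpha]).
-- alphabet[alpha] raises KeyError when get? is none; the Option threads the raise, Pre_ excludes it.
def Porta_key_generator (key : String) : List (List (List String)) :=
  (((PySem.Str.upper key).toList).foldl
    (fun acc alpha =>
      match acc, pvAlphabet.get? alpha with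
      | some tab, some v => some (tab ++ [v])
      | _, _ => none)
    (some [])).getD []

-- ===== PORT B =====
def pvFirstB : List String := ["A","B","C","D","E","F","G","H","I","J","K","L","M"]
def pvBaseB : List String := ["N","O","P","Q","R","S","T","U","V","W","X","Y","Z"]

-- Source B's _porta_row: i = ord(ch)-65; KeyError (none) unless 0 ≤ i < 26; s = 13 - i//2;
-- row = base[s:] + base[:s].
def pvPortaRow? (ch : Char) : Option (List (List String)) :=
  let i : Int := (ch.toNat : Int) - 65
  if 0 ≤ i ∧ i < 26 then
    let s : Int := 13 - PySem.Int.floordiv i 2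
    some [pvFirstB, PySem.List.slice pvBaseB (some s) none ++ PySem.List.slice pvBaseB none (some s)]
  else none

-- Source B's comprehension [_porta_row(ch) for ch in key.upper()] (mapM threads the raise).
def Porta_key_generator_alt (key : String) : List (List (List String)) :=
  (((PySem.Str.upper key).toList).mapM pvPortaRow?).getD []

-- ===== PRECONDITION & SPEC =====
-- Pre_ excludes exactly the keys containing a non-ASCII-letter character: there A raises
-- KeyError (and B raises the same KeyError).
def Pre_Porta_key_generator (key : String) : Prop :=
  (key.toList.all (fun c => (65 ≤ c.toNat && c.toNat ≤ 90) || (97 ≤ c.toNat && c.toNat ≤ 122))) = true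
instance (key : String) : Decidable (Pre_Porta_key_generator key) := by
  unfold Pre_Porta_key_generator; infer_instance

def pvWitness_Porta_key_generator : String := "KeY"

def Spec_Porta_key_generator (key : String) (out : List (List (List String))) : Prop :=
  out = Porta_key_generator_alt key
instance (key : String) (out : List (List (List String))) : Decidable (Spec_Porta_key_generator key out) := by
  unfold Spec_Porta_key_generator; infer_instance

-- ===== CLAIM (what is proved, stated in full; the proofs are below) =====
def Claim_equal_Porta_key_generator : Prop :=
  ∀ (key : String), Dom_Porta_key_generator key → Pre_Porta_key_generator key →
    Spec_Porta_key_generator key (Porta_key_generator key)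

-- ===== LEMMAS AND PROOFS =====

-- On each uppercase letter, A's dict lookup and B's rotation agree (26 + boundary cases, checked by decide over the code range).
lemma pv_step_agree (u : Char) (h1 : 65 ≤ u.toNat) (h2 : u.toNat ≤ 90) :
    pvAlphabet.get? u = pvPortaRow? u := by
  have key : ∀ n : Nat, n < 91 → 65 ≤ n →
      pvAlphabet.get? (Char.ofNat n) = pvPortaRow? (Char.ofNat n) := by decide
  have := key u.toNat (by omega) h1
  simpa [Char.ofNat_toNat] using this

-- upperChar of an ASCII letter is an uppercase letter.
lemma pv_upperChar_range (c : Char)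
    (h : (65 ≤ c.toNat ∧ c.toNat ≤ 90) ∨ (97 ≤ c.toNat ∧ c.toNat ≤ 122)) :
    65 ≤ (PySem.Chars.upperChar c).toNat ∧ (PySem.Chars.upperChar c).toNat ≤ 90 := by
  have key : ∀ n : Nat, n < 123 → (65 ≤ n ∧ n ≤ 90 ∨ 97 ≤ n ∧ n ≤ 122) →
      65 ≤ (PySem.Chars.upperChar (Char.ofNat n)).toNat ∧
      (PySem.Chars.upperChar (Char.ofNat n)).toNat ≤ 90 := by decide
  have := key c.toNat (by omega) h
  simpa [Char.ofNat_toNat] using this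

-- A's fold over a list of chars whose lookups all succeed collects the lookup values.
lemma pv_foldA (L : List Char) (h : ∀ c ∈ L, (pvAlphabet.get? c).isSome) :
    ∀ tab : List (List (List String)),
      L.foldl (fun acc alpha =>
          match acc, pvAlphabet.get? alpha with
          | some tab, some v => some (tab ++ [v])
          | _, _ => none) (some tab)
        = some (tab ++ L.map (fun c => (pvAlphabet.get? c).getD [])) := by
  induction L with
  | nil => intro tab; simp
  | cons c L ih =>
    intro tab
    have hc := h c (List.mem_cons_self)
    obtain ⟨v, hv⟩ := Option.isSome_iff_exists.mp hc
    have ih' := ih (fun x hx => h x (List.mem_cons_of_mem _ hx)) (tab ++ [v])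
    simp only [List.foldl_cons, hv] at ih' ⊢
    rw [ih']
    simp [hv]

-- B's mapM over a list of chars whose rows all succeed collects the row values.
lemma pv_mapMB (L : List Char) (h : ∀ c ∈ L, (pvPortaRow? c).isSome) :
    L.mapM pvPortaRow? = some (L.map (fun c => (pvPortaRow? c).getD [])) := by
  induction L with
  | nil => simp
  | cons c L ih =>
    obtain ⟨v, hv⟩ := Option.isSome_iff_exists.mp (h c List.mem_cons_self)
    have ih' := ih (fun x hx => h x (List.mem_cons_of_mem _ hx))
    simp [List.mapM_cons, hv, ih']

-- ===== VERDICT (by name: the statement is the Claim_ definition above) =====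
theorem Porta_key_generator_spec : Claim_equal_Porta_key_generator := by
  intro key _ hpre
  unfold Pre_Porta_key_generator at hpre
  unfold Spec_Porta_key_generator Porta_key_generator Porta_key_generator_alt
  have hup : (PySem.Str.upper key).toList = PySem.Chars.upper key.toList := by
    simp [PySem.Str.toList_upper]
  rw [hup]
  set L := PySem.Chars.upper key.toList with hL
  have hrange : ∀ u ∈ L, 65 ≤ u.toNat ∧ u.toNat ≤ 90 := by
    intro u hu
    rw [hL, PySem.Chars.upper, List.mem_map] at hu
    obtain ⟨c, hc, rfl⟩ := hu
    have hc' := (List.all_eq_true.mp hpre) c hc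
    simp only [Bool.or_eq_true, Bool.and_eq_true, decide_eq_true_eq] at hc'
    exact pv_upperChar_range c hc'
  have hsomeA : ∀ u ∈ L, (pvAlphabet.get? u).isSome := by
    intro u hu
    rw [pv_step_agree u (hrange u hu).1 (hrange u hu).2]
    have key : ∀ n : Nat, n < 91 → 65 ≤ n → (pvPortaRow? (Char.ofNat n)).isSome := by decide
    have := key u.toNat (by have := (hrange u hu).2; omega) (hrange u hu).1
    simpa [Char.ofNat_toNat] using this
  have hsomeB : ∀ u ∈ L, (pvPortaRow? u).isSome := by
    intro u hu
    rw [← pv_step_agree u (hrange u hu).1 (hrange u hu).2]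
    exact hsomeA u hu
  rw [pv_foldA L hsomeA [], pv_mapMB L hsomeB]
  simp only [Option.getD_some, List.nil_append]
  exact List.map_congr_left (fun u hu => by
    rw [pv_step_agree u (hrange u hu).1 (hrange u hu).2])
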